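-- pv_equiv track=rewrite | github.com/suavecitoprograms/Programming-Projects-and-Courses | MOOC 2023 Programming/part08-01_smallest_average/src/smallest_average.py | smallest_average
-- ===== SOURCE A (Python) =====
-- def smallest_average(person1: dict, person2: dict, person3: dict):
--     directory = (person1, person2, person3)
--     start = True
--     for person in directory:
--         total = 0
--         for category, value in person.items():
--             if category == "name":
--                 continue
--             total += value
--         if start or total < max:
--             max = total
--             winner = person
--             start = False
--     return winner
-- ===== SOURCE B (Python) =====
-- def smallest_average(person1: dict, person2: dict, person3: dict):
--     def total(person):
--         t = 0
--         for category, value in person.items():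
--             if category == "name":
--                 continue
--             t += value
--         return t
--     return sorted((person1, person2, person3), key=total)[0]
-- ===== Notes on version B (the rewrite author's own statement) =====
-- stated objective: alternative
-- what changed: B computes each person's non-name total as a key function and returns the first element of a stable sort of the three people by that key, instead of tracking a running minimum with a start flag in one pass.
import Mathlib
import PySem

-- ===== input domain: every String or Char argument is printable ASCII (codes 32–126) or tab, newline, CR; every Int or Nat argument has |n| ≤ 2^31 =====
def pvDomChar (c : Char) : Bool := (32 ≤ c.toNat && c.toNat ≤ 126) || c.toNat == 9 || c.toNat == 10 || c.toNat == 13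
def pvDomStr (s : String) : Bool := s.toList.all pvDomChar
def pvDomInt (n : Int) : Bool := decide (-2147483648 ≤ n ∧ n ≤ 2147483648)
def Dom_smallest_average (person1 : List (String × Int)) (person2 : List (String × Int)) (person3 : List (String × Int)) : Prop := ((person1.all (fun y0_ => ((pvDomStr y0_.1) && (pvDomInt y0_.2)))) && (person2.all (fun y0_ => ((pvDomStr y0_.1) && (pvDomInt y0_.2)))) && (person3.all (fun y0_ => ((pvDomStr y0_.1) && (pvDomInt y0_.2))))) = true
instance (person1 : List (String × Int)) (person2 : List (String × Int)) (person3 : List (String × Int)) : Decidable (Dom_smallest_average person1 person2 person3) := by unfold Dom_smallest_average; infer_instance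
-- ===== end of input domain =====

-- ===== PORT A =====
-- A: one pass over the three people, tracking a running minimum total with a start flag.
def smallest_average (person1 : List (String × Int)) (person2 : List (String × Int)) (person3 : List (String × Int)) : List (String × Int) :=
  let directory := [person1, person2, person3]
  (directory.foldl
    (fun (st : Bool × Int × List (String × Int)) person =>
      let total := person.foldl (fun t kv => if kv.1 == "name" then t else t + kv.2) 0
      if st.1 || decide (total < st.2.1) then (false, total, person) else st)
    (true, 0, [])).2.2

-- ===== PORT B =====
-- B: compute each person's non-"name" total as a key and take the head of a stable sort.
def pvTotal (person : List (String × Int)) : Int :=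
  person.foldl (fun t kv => if kv.1 == "name" then t else t + kv.2) 0

def smallest_average_alt (person1 : List (String × Int)) (person2 : List (String × Int)) (person3 : List (String × Int)) : List (String × Int) :=
  -- sorted(...)[0]: the sorted list of three people is nonempty, so the default is unreachable
  (PySem.List.sorted [person1, person2, person3] pvTotal false).headD []

-- ===== PRECONDITION & SPEC =====
def Spec_smallest_average (person1 : List (String × Int)) (person2 : List (String × Int)) (person3 : List (String × Int)) (out : List (String × Int)) : Prop := out = smallest_average_alt person1 person2 person3
instance (person1 : List (String × Int)) (person2 : List (String × Int)) (person3 : List (String × Int)) (out : List (String × Int)) : Decidable (Spec_smallest_average person1 person2 person3 out) := by unfold Spec_smallest_average; infer_instance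

-- ===== CLAIM (what is proved, stated in full; the proofs are below) =====
def Claim_equal_smallest_average : Prop := ∀ (person1 : List (String × Int)) (person2 : List (String × Int)) (person3 : List (String × Int)), Dom_smallest_average person1 person2 person3 → Spec_smallest_average person1 person2 person3 (smallest_average person1 person2 person3)

-- ===== LEMMAS AND PROOFS =====

-- ===== VERDICT (by name: the statement is the Claim_ definition above) =====
theorem smallest_average_spec : Claim_equal_smallest_average := by
  intro p1 p2 p3 _
  unfold Spec_smallest_average smallest_average smallest_average_alt pvTotal
  simp only [PySem.List.sorted_eq_foldl_insertBy, List.foldl, PySem.List.insertBy]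
  split_ifs <;> simp_all [PySem.List.insertBy] <;> split_ifs <;> simp_all <;> omega
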